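-- pv_equiv track=rewrite | github.com/micronwave/narrative-engine-template | api/main.py | _categorize_domain
-- ===== SOURCE A (Python) =====
-- _NEWS_DOMAINS = {"reuters", "cnbc", "bloomberg", "ft.com", "bbc", "guardian",
--                   "washingtonpost", "nytimes", "aljazeera", "decrypt", "coindesk",
--                   "investing.com", "marketwatch", "cnn", "foxbusiness", "theguardian"}
--
-- _RESEARCH_DOMAINS = {"seekingalpha", "siliconangle", "bitcoinmagazine", "theblock",
--                      "analyst", "research", "morningstar"}
--
-- _FILING_DOMAINS = {"sec.gov", "prnewswire", "businesswire", "globenewswire", "edgar"}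
--
-- def _categorize_domain(domain: str) -> str:
--     domain_parts = domain.lower().split(".")
--     for kw in _NEWS_DOMAINS:
--         if kw in domain_parts:
--             return "news"
--     for kw in _RESEARCH_DOMAINS:
--         if kw in domain_parts:
--             return "research"
--     for kw in _FILING_DOMAINS:
--         if kw in domain_parts:
--             return "filings"
--     return "other"
-- ===== SOURCE B (Python) =====
-- _CATEGORY_BY_KEYWORD = {}
-- for _kw in ("reuters", "cnbc", "bloomberg", "ft.com", "bbc", "guardian",
--             "washingtonpost", "nytimes", "aljazeera", "decrypt", "coindesk",
--             "investing.com", "marketwatch", "cnn", "foxbusiness", "theguardian"):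
--     _CATEGORY_BY_KEYWORD[_kw] = "news"
-- for _kw in ("seekingalpha", "siliconangle", "bitcoinmagazine", "theblock",
--             "analyst", "research", "morningstar"):
--     _CATEGORY_BY_KEYWORD[_kw] = "research"
-- for _kw in ("sec.gov", "prnewswire", "businesswire", "globenewswire", "edgar"):
--     _CATEGORY_BY_KEYWORD[_kw] = "filings"
--
-- _PRIORITY = ("news", "research", "filings")
--
-- def _categorize_domain(domain: str) -> str:
--     matched = {_CATEGORY_BY_KEYWORD.get(part) for part in domain.lower().split(".")}
--     for cat in _PRIORITY:
--         if cat in matched: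
--             return cat
--     return "other"
-- ===== Notes on version B (the rewrite author's own statement) =====
-- stated objective: idiomatic
-- what changed: Replaced three category-by-category scans over keyword sets with one merged keyword->category dict: B looks up each domain part once, collects the matched categories into a set, and resolves by the fixed news>research>filings priority.
import Mathlib
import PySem

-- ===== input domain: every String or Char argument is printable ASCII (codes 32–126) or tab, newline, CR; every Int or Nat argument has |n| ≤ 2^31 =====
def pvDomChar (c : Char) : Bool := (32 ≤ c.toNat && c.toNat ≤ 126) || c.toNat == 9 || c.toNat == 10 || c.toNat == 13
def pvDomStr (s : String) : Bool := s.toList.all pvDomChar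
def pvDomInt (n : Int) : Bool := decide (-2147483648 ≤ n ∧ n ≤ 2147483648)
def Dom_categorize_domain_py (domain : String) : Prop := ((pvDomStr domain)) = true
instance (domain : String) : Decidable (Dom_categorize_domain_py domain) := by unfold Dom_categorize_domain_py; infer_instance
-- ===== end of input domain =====

-- B replaces the three category-by-category keyword scans by one merged keyword→category
-- dict: look each domain part up once, collect matched categories, resolve by fixed priority.

-- ===== PORT A =====
-- the three module-level keyword sets (iteration order of the Python set is irrelevant:
-- any hit inside one set returns the same category string)
def pvNewsKws : List String :=
  ["reuters", "cnbc", "bloomberg", "ft.com", "bbc", "guardian",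
   "washingtonpost", "nytimes", "aljazeera", "decrypt", "coindesk",
   "investing.com", "marketwatch", "cnn", "foxbusiness", "theguardian"]
def pvResearchKws : List String :=
  ["seekingalpha", "siliconangle", "bitcoinmagazine", "theblock",
   "analyst", "research", "morningstar"]
def pvFilingKws : List String :=
  ["sec.gov", "prnewswire", "businesswire", "globenewswire", "edgar"]

def categorize_domain_py (domain : String) : String :=
  let domain_parts := (PySem.Str.split? (PySem.Str.lower domain) ".").getD []
  -- 'for kw in S: if kw in domain_parts: return c' — an early-returning scan over the set
  if pvNewsKws.any (fun kw => domain_parts.contains kw) then "news"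
  else if pvResearchKws.any (fun kw => domain_parts.contains kw) then "research"
  else if pvFilingKws.any (fun kw => domain_parts.contains kw) then "filings"
  else "other"

-- ===== PORT B =====
-- merged dict built by three insert loops, exactly as Source B builds _CATEGORY_BY_KEYWORD
def pvCatByKeyword : PySem.Dict String String :=
  pvFilingKws.foldl (fun d kw => d.insert kw "filings")
    (pvResearchKws.foldl (fun d kw => d.insert kw "research")
      (pvNewsKws.foldl (fun d kw => d.insert kw "news") PySem.Dict.empty))

def categorize_domain_py_alt (domain : String) : String :=
  let parts := (PySem.Str.split? (PySem.Str.lower domain) ".").getD []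
  -- matched = {dict.get(part) for part in parts} : a set of Option String
  let matched : PySem.Set (Option String) := PySem.Set.ofList (parts.map (fun p => pvCatByKeyword.get? p))
  -- 'for cat in _PRIORITY: if cat in matched: return cat' — early-returning scan
  if matched.contains (some "news") then "news"
  else if matched.contains (some "research") then "research"
  else if matched.contains (some "filings") then "filings"
  else "other"

-- ===== PRECONDITION & SPEC =====
def Spec_categorize_domain_py (domain : String) (out : String) : Prop := out = categorize_domain_py_alt domain
instance (domain : String) (out : String) : Decidable (Spec_categorize_domain_py domain out) := by unfold Spec_categorize_domain_py; infer_instance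

-- ===== CLAIM (what is proved, stated in full; the proofs are below) =====
def Claim_equal_categorize_domain_py : Prop := ∀ (domain : String), Dom_categorize_domain_py domain → Spec_categorize_domain_py domain (categorize_domain_py domain)

-- ===== LEMMAS AND PROOFS =====

theorem pv_get?_mk_map_append (L : List String) (c : String) (rest : List (String × String)) (p : String) :
    (PySem.Dict.mk (L.map (fun kw => (kw, c)) ++ rest)).get? p
      = if p ∈ L then some c else (PySem.Dict.mk rest).get? p := by
  induction L with
  | nil => simp
  | cons kw t ih =>
    by_cases hkw : kw = p
    · subst hkw; simp [PySem.Dict.get?_mk_cons]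
    · simp [PySem.Dict.get?_mk_cons, hkw, ih, Ne.symm hkw]

-- the insert loops build exactly the concatenated association list (all 28 keys are distinct)
theorem pv_items_eq : pvCatByKeyword = PySem.Dict.mk
    (pvNewsKws.map (fun kw => (kw, "news")) ++ pvResearchKws.map (fun kw => (kw, "research"))
      ++ pvFilingKws.map (fun kw => (kw, "filings"))) := by decide

-- the merged dict's lookup, characterised as a priority if-chain over the three keyword lists
theorem pv_lookup_eq (p : String) :
    pvCatByKeyword.get? p =
      (if p ∈ pvNewsKws then some "news"
       else if p ∈ pvResearchKws then some "research"
       else if p ∈ pvFilingKws then some "filings"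
       else none) := by
  rw [pv_items_eq, List.append_assoc, pv_get?_mk_map_append, pv_get?_mk_map_append]
  rw [show (pvFilingKws.map (fun kw => (kw, "filings")) : List (String × String))
        = pvFilingKws.map (fun kw => (kw, "filings")) ++ [] by simp]
  rw [pv_get?_mk_map_append]
  rfl

-- the three keyword lists are pairwise disjoint
theorem pv_news_disj (p : String) (h : p ∈ pvNewsKws) : p ∉ pvResearchKws ∧ p ∉ pvFilingKws := by
  fin_cases h <;> decide

theorem pv_research_disj (p : String) (h : p ∈ pvResearchKws) : p ∉ pvFilingKws := by
  fin_cases h <;> decide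

theorem pv_lookup_news (p : String) :
    (pvCatByKeyword.get? p = some "news") ↔ p ∈ pvNewsKws := by
  rw [pv_lookup_eq]; split_ifs <;> simp_all

theorem pv_lookup_research (p : String) :
    (pvCatByKeyword.get? p = some "research") ↔ p ∈ pvResearchKws := by
  rw [pv_lookup_eq]; split_ifs with h1 h2 <;> simp_all
  exact (pv_news_disj p h1).1

theorem pv_lookup_filings (p : String) :
    (pvCatByKeyword.get? p = some "filings") ↔ p ∈ pvFilingKws := by
  rw [pv_lookup_eq]; split_ifs with h1 h2 h3 <;> simp_all
  · exact (pv_news_disj p h1).2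
  · exact pv_research_disj p h2

-- one matched-set test of B equals the corresponding keyword scan of A
theorem pv_cond_eq (parts : List String) (kws : List String) (c : String)
    (h : ∀ p, (pvCatByKeyword.get? p = some c) ↔ p ∈ kws) :
    ((PySem.Set.ofList (parts.map (fun p => pvCatByKeyword.get? p))).contains (some c)
      = kws.any (fun kw => parts.contains kw)) := by
  rw [Bool.eq_iff_iff]
  simp [PySem.Set.mem_ofList, h]
  tauto


-- ===== VERDICT (by name: the statement is the Claim_ definition above) =====
theorem categorize_domain_py_spec : Claim_equal_categorize_domain_py := by
  intro domain _
  unfold Spec_categorize_domain_py categorize_domain_py categorize_domain_py_alt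
  simp only
  rw [pv_cond_eq _ pvNewsKws _ pv_lookup_news,
      pv_cond_eq _ pvResearchKws _ pv_lookup_research,
      pv_cond_eq _ pvFilingKws _ pv_lookup_filings]
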